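-- pv_equiv track=rewrite | github.com/NeuroBAU/svp | svp/scripts/structural_check.py | format_audit_violations
-- ===== SOURCE A (Python) =====
-- from typing import Any, Callable, Dict, List, Set, Tuple
--
-- def format_audit_violations(violations: List[Dict[str, Any]]) -> str:
--     """Format an audit violation list into a human-readable error string.
--
--     Suitable for raising as a ValueError message or printing to stderr.
--     """
--     if not violations:
--         return "Blueprint contract audit passed."
--
--     lines: List[str] = [
--         f"Blueprint contract audit found {len(violations)} violation(s) "
--         f"(Bug S3-158):",
--         "",
--     ]
--     by_check: Dict[str, List[Dict[str, Any]]] = {}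
--     for v in violations:
--         by_check.setdefault(v.get("check", "?"), []).append(v)
--
--     for check_name in sorted(by_check):
--         items = by_check[check_name]
--         lines.append(f"  [{check_name}] ({len(items)}):")
--         for v in items:
--             sev = v.get("severity", "?")
--             loc = v.get("location", "?")
--             desc = v.get("description", "?")
--             lines.append(f"    - ({sev}) {loc}: {desc}")
--         lines.append("")
--
--     lines.append(
--         "If a finding is a known false positive, add its description text "
--         "as a line in .svp/audit_known_false_positives.md and re-run."
--     )
--     return "\n".join(lines)
-- ===== SOURCE B (Python) =====
-- def format_audit_violations(violations):
--     """Format an audit violation list into a human-readable error string."""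
--     if not violations:
--         return "Blueprint contract audit passed."
--
--     def check_of(v):
--         return v.get("check", "?")
--
--     lines = [
--         f"Blueprint contract audit found {len(violations)} violation(s) "
--         f"(Bug S3-158):",
--         "",
--     ]
--     # Stable sort brings each check's violations together, in original order;
--     # then emit one block per maximal run of equal check names.
--     rest = sorted(violations, key=check_of)
--     while rest:
--         name = check_of(rest[0])
--         n = 1
--         while n < len(rest) and check_of(rest[n]) == name:
--             n += 1
--         run, rest = rest[:n], rest[n:]
--         lines.append(f"  [{name}] ({len(run)}):")
--         lines += [
--             f"    - ({v.get('severity', '?')}) "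
--             f"{v.get('location', '?')}: {v.get('description', '?')}"
--             for v in run
--         ]
--         lines.append("")
--     lines.append(
--         "If a finding is a known false positive, add its description text "
--         "as a line in .svp/audit_known_false_positives.md and re-run."
--     )
--     return "\n".join(lines)
-- ===== Notes on version B (the rewrite author's own statement) =====
-- stated objective: idiomatic
-- what changed: Replaces the by_check dict grouping plus per-key lookup with a stable sort by check name followed by a single scan that emits one block per maximal run of equal check names.
import Mathlib
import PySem

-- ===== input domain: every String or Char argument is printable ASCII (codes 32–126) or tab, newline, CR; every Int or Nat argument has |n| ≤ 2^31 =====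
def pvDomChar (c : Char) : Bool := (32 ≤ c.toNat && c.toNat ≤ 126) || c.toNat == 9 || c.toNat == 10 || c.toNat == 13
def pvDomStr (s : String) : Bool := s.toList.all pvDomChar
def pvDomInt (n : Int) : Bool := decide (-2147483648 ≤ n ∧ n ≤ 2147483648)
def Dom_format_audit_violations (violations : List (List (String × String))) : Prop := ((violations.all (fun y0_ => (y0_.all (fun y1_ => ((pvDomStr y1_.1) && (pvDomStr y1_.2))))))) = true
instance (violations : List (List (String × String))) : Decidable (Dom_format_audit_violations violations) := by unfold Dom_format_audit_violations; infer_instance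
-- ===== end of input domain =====

-- B replaces A's by_check dict grouping with a stable sort by check name followed by
-- one scan emitting a block per maximal run of equal check names (objective: idiomatic).


-- shared primitive: Python's v.get(k, dflt) on an input dict (assoc list, first match)
def pvGet (v : List (String × String)) (k dflt : String) : String :=
  match v.find? (fun p => p.1 == k) with
  | some p => p.2
  | none => dflt

def pvHeader (violations : List (List (String × String))) : String :=
  "Blueprint contract audit found " ++ PySem.Int.toStr (violations.length : Int) ++
    " violation(s) (Bug S3-158):"

def pvFooter : String :=
  "If a finding is a known false positive, add its description text " ++
    "as a line in .svp/audit_known_false_positives.md and re-run."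

def pvDescLine (v : List (String × String)) : String :=
  "    - (" ++ pvGet v "severity" "?" ++ ") " ++ pvGet v "location" "?" ++ ": " ++
    pvGet v "description" "?"

-- ===== PORT A =====
def format_audit_violations (violations : List (List (String × String))) : String :=
  if violations = [] then "Blueprint contract audit passed."
  else
    let lines : List String := [pvHeader violations, ""]
    -- by_check.setdefault(v.get("check","?"), []).append(v)  ==  modify key [] (· ++ [v])
    let byCheck : PySem.Dict String (List (List (String × String))) :=
      violations.foldl (fun d v => d.modify (pvGet v "check" "?") [] (· ++ [v]))
        PySem.Dict.empty
    let lines := (PySem.List.sorted byCheck.keys (fun k => k)).foldl (fun acc checkName =>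
      -- by_check[check_name] never misses: checkName ∈ byCheck.keys, so getD is exact
      let items := byCheck.getD checkName []
      let acc := acc ++ ["  [" ++ checkName ++ "] (" ++ PySem.Int.toStr (items.length : Int) ++ "):"]
      let acc := items.foldl (fun acc v => acc ++ [pvDescLine v]) acc
      acc ++ [""]) lines
    PySem.Str.join "\n" (lines ++ [pvFooter])

-- ===== PORT B =====
-- the outer 'while rest:' loop of Source B: each pass takes the maximal leading run of
-- equal check names (run = rest[:n], n counted by the inner while) and emits its block
def pvEmit : List (List (String × String)) → List String
  | [] => []
  | v :: rest =>
      let name := pvGet v "check" "?"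
      let run := v :: rest.takeWhile (fun w => pvGet w "check" "?" == name)
      (("  [" ++ name ++ "] (" ++ PySem.Int.toStr (run.length : Int) ++ "):") ::
        run.map pvDescLine ++ [""]) ++
        pvEmit (rest.dropWhile (fun w => pvGet w "check" "?" == name))
termination_by l => l.length
decreasing_by
  simp only [List.length_cons]
  exact Nat.lt_succ_of_le (List.length_dropWhile_le _ _)

def format_audit_violations_alt (violations : List (List (String × String))) : String :=
  if violations = [] then "Blueprint contract audit passed."
  else
    PySem.Str.join "\n"
      ([pvHeader violations, ""] ++
        pvEmit (PySem.List.sorted violations (fun v => pvGet v "check" "?")) ++ [pvFooter])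

-- ===== PRECONDITION & SPEC =====
def Spec_format_audit_violations (violations : List (List (String × String))) (out : String) : Prop := out = format_audit_violations_alt violations
instance (violations : List (List (String × String))) (out : String) : Decidable (Spec_format_audit_violations violations out) := by unfold Spec_format_audit_violations; infer_instance

-- ===== CLAIM (what is proved, stated in full; the proofs are below) =====
def Claim_equal_format_audit_violations : Prop := ∀ (violations : List (List (String × String))), Dom_format_audit_violations violations → Spec_format_audit_violations violations (format_audit_violations violations)

-- ===== LEMMAS AND PROOFS =====

def pvKey (v : List (String × String)) : String := pvGet v "check" "?"

-- L3: filtering one stable insertion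
lemma pv_filter_insertBy (k : String) (x : List (String × String))
    (ys : List (List (String × String)))
    (h : ys.Pairwise (fun a b => pvKey a ≤ pvKey b)) :
    (PySem.List.insertBy (fun a b => decide (pvKey a < pvKey b)) x ys).filter
        (fun v => pvKey v == k)
      = if pvKey x == k then ys.filter (fun v => pvKey v == k) ++ [x]
        else ys.filter (fun v => pvKey v == k) := by
  induction ys with
  | nil => simp [PySem.List.insertBy]; split <;> simp_all
  | cons y ys ih =>
    rw [PySem.List.insertBy]
    by_cases hlt : pvKey x < pvKey y
    · simp only [hlt, decide_true, if_true]
      by_cases hx : pvKey x == k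
      · have hk : pvKey x = k := by simpa using hx
        have hnil : (y :: ys).filter (fun v => pvKey v == k) = [] := by
          rw [List.filter_eq_nil_iff]
          intro w hw
          have : pvKey y ≤ pvKey w := by
            rcases hw with _ | hw
            · exact le_refl _
            · exact (List.pairwise_cons.mp h).1 _ (by assumption)
          simp only [beq_iff_eq]
          intro hwk; rw [hwk, ← hk] at this; exact absurd (lt_of_lt_of_le hlt this) (lt_irrefl _)
        simp [hx, hnil]
      · simp [hx, List.filter_cons]
    · simp only [hlt, decide_false, Bool.false_eq_true, if_false, List.filter_cons]
      rw [ih (List.pairwise_cons.mp h).2]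
      by_cases hx : pvKey x == k <;> by_cases hy : pvKey y == k <;> simp [hx, hy]

-- L5: stability — sorting by check name does not change a per-check filter
lemma pv_filter_sorted (k : String) (xs : List (List (String × String))) :
    (PySem.List.sorted xs pvKey).filter (fun v => pvKey v == k)
      = xs.filter (fun v => pvKey v == k) := by
  induction xs using List.reverseRecOn with
  | nil => simp [PySem.List.sorted_eq_foldl_insertBy]
  | append_singleton xs x ih =>
    rw [PySem.List.sorted_eq_foldl_insertBy, List.foldl_append, List.foldl_cons, List.foldl_nil,
      ← PySem.List.sorted_eq_foldl_insertBy,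
      pv_filter_insertBy k x _ (PySem.List.sorted_pairwise xs pvKey), List.filter_append]
    by_cases hx : pvKey x == k <;> simp [hx, ih]

-- L6: after dropping the leading run of v's check, every check name is strictly larger
lemma pv_dropWhile_gt (v : List (String × String)) (rest : List (List (String × String)))
    (h : (v :: rest).Pairwise (fun a b => pvKey a ≤ pvKey b)) :
    ∀ w ∈ rest.dropWhile (fun w => pvKey w == pvKey v), pvKey v < pvKey w := by
  induction rest with
  | nil => simp
  | cons r rest ih =>
    rw [List.dropWhile_cons]
    by_cases hr : pvKey r == pvKey v
    · simp only [hr, if_true]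
      refine ih ?_
      rcases List.pairwise_cons.mp h with ⟨hv, hrest⟩
      exact List.pairwise_cons.mpr ⟨fun w hw => hv w (List.mem_cons_of_mem _ hw),
        (List.pairwise_cons.mp hrest).2⟩
    · simp only [hr, Bool.false_eq_true, if_false]
      have hvr : pvKey v < pvKey r := by
        have := (List.pairwise_cons.mp h).1 r (List.mem_cons_self ..)
        exact lt_of_le_of_ne this (fun e => hr (by simp [e]))
      intro w hw
      rcases hw with _ | hw
      · exact hvr
      · have : pvKey r ≤ pvKey w :=
          (List.pairwise_cons.mp (List.pairwise_cons.mp h).2).1 w (by assumption)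
        exact lt_of_lt_of_le hvr this

-- L6a: the leading run IS the per-check filter (sorted list)
lemma pv_takeWhile_eq_filter (v : List (String × String)) (rest : List (List (String × String)))
    (h : (v :: rest).Pairwise (fun a b => pvKey a ≤ pvKey b)) :
    rest.takeWhile (fun w => pvKey w == pvKey v) = rest.filter (fun w => pvKey w == pvKey v) := by
  have h1 : (rest.takeWhile (fun w => pvKey w == pvKey v)).filter (fun w => pvKey w == pvKey v)
      = rest.takeWhile (fun w => pvKey w == pvKey v) :=
    List.filter_eq_self.mpr (fun w hw => List.mem_takeWhile_imp (p := fun w => pvKey w == pvKey v) hw)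
  have h2 : (rest.dropWhile (fun w => pvKey w == pvKey v)).filter (fun w => pvKey w == pvKey v)
      = [] :=
    List.filter_eq_nil_iff.mpr (fun w hw => by
      have := pv_dropWhile_gt v rest h w hw
      simp only [beq_iff_eq]; intro e; rw [e] at this; exact lt_irrefl _ this)
  conv_rhs => rw [← List.takeWhile_append_dropWhile (p := fun w => pvKey w == pvKey v) (l := rest)]
  rw [List.filter_append, h1, h2, List.append_nil]

-- the check names pvEmit's blocks are emitted for, in emission order
lemma pvKey_def (v : List (String × String)) : pvGet v "check" "?" = pvKey v := rfl

def pvKeys : List (List (String × String)) → List String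
  | [] => []
  | v :: rest => pvKey v :: pvKeys (rest.dropWhile (fun w => pvKey w == pvKey v))
termination_by l => l.length
decreasing_by
  simp only [List.length_cons]
  exact Nat.lt_succ_of_le (List.length_dropWhile_le _ _)

def pvBlock (l : List (List (String × String))) (k : String) : List String :=
  ("  [" ++ k ++ "] (" ++ PySem.Int.toStr ((l.filter (fun v => pvKey v == k)).length : Int) ++ "):") ::
    (l.filter (fun v => pvKey v == k)).map pvDescLine ++ [""]

lemma pv_mem_pvKeys (l : List (List (String × String))) (x : String) :
    x ∈ pvKeys l → ∃ w ∈ l, pvKey w = x := by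
  induction l using pvKeys.induct with
  | case1 => simp [pvKeys]
  | case2 v rest ih =>
    rw [pvKeys]
    rintro (_ | hx)
    · exact ⟨v, List.mem_cons_self .., rfl⟩
    · rcases ih (by assumption) with ⟨w, hw, hwk⟩
      exact ⟨w, List.mem_cons_of_mem _ ((List.dropWhile_sublist _).subset hw), hwk⟩

lemma pv_mem_pvKeys_of_mem (l : List (List (String × String)))
    (h : l.Pairwise (fun a b => pvKey a ≤ pvKey b)) :
    ∀ w ∈ l, pvKey w ∈ pvKeys l := by
  induction l using pvKeys.induct with
  | case1 => simp
  | case2 v rest ih =>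
    intro w hw
    rw [pvKeys]
    by_cases hk : pvKey w = pvKey v
    · rw [hk]; exact List.mem_cons_self ..
    · rcases List.mem_cons.mp hw with heq | hw
      · exact absurd (heq ▸ rfl) hk
      have hdrop : w ∈ rest.dropWhile (fun w => pvKey w == pvKey v) := by
        rw [← List.takeWhile_append_dropWhile (p := fun w => pvKey w == pvKey v) (l := rest)]
          at hw
        rcases List.mem_append.mp hw with htw | hd
        · exact absurd (by simpa using List.mem_takeWhile_imp (p := fun w => pvKey w == pvKey v) htw) hk
        · exact hd
      exact List.mem_cons_of_mem _
        (ih ((List.pairwise_cons.mp h).2.sublist (List.dropWhile_sublist _)) w hdrop)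

lemma pv_pvKeys_pairwise (l : List (List (String × String)))
    (h : l.Pairwise (fun a b => pvKey a ≤ pvKey b)) :
    (pvKeys l).Pairwise (fun a b => a < b) := by
  induction l using pvKeys.induct with
  | case1 => simp [pvKeys]
  | case2 v rest ih =>
    rw [pvKeys]
    refine List.pairwise_cons.mpr ⟨?_, ih ((List.pairwise_cons.mp h).2.sublist (List.dropWhile_sublist _))⟩
    intro k hk
    rcases pv_mem_pvKeys _ _ hk with ⟨w, hw, hwk⟩
    rw [← hwk]
    exact pv_dropWhile_gt v rest h w hw

lemma pv_pvEmit_eq (l : List (List (String × String)))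
    (h : l.Pairwise (fun a b => pvKey a ≤ pvKey b)) :
    pvEmit l = (pvKeys l).flatMap (pvBlock l) := by
  induction l using pvKeys.induct with
  | case1 => simp [pvEmit, pvKeys]
  | case2 v rest ih =>
    have htail : (rest.dropWhile (fun w => pvKey w == pvKey v)).Pairwise
        (fun a b => pvKey a ≤ pvKey b) :=
      (List.pairwise_cons.mp h).2.sublist (List.dropWhile_sublist _)
    have hrun : (v :: rest).filter (fun w => pvKey w == pvKey v)
        = v :: rest.takeWhile (fun w => pvKey w == pvKey v) := by
      rw [List.filter_cons_of_pos (by simp), pv_takeWhile_eq_filter v rest h]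
    have hblock : pvBlock (v :: rest) (pvKey v)
        = ("  [" ++ pvKey v ++ "] (" ++
            PySem.Int.toStr (((v :: rest.takeWhile (fun w => pvKey w == pvKey v)).length : Int)) ++ "):") ::
          (v :: rest.takeWhile (fun w => pvKey w == pvKey v)).map pvDescLine ++ [""] := by
      rw [pvBlock, hrun]
    rw [pvEmit, pvKeys, List.flatMap_cons]
    simp only [pvKey_def]
    rw [ih htail, hblock]
    congr 1
    refine List.flatMap_congr (fun k hk => ?_)
    rcases pv_mem_pvKeys _ _ hk with ⟨w, hw, hwk⟩
    have hgt : pvKey v < k := hwk ▸ pv_dropWhile_gt v rest h w hw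
    have hne : ∀ u : List (String × String), pvKey u = pvKey v → (pvKey u == k) = false := by
      intro u hu
      simp only [beq_eq_false_iff_ne, ne_eq, hu]
      intro e; rw [e] at hgt; exact lt_irrefl _ hgt
    unfold pvBlock
    have hfil : (v :: rest).filter (fun u => pvKey u == k)
        = (rest.dropWhile (fun w => pvKey w == pvKey v)).filter (fun u => pvKey u == k) := by
      rw [List.filter_cons_of_neg (by simp [hne v rfl]),
        ← List.takeWhile_append_dropWhile (p := fun w => pvKey w == pvKey v) (l := rest),
        List.filter_append,
        List.filter_eq_nil_iff.mpr (fun u hu => by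
          have := List.mem_takeWhile_imp (p := fun w => pvKey w == pvKey v) hu
          simp [hne u (by simpa using this)]),
        List.nil_append,
        List.takeWhile_append_dropWhile]
    rw [hfil]

lemma pv_sorted_keys (violations : List (List (String × String))) :
    PySem.List.sorted (PySem.List.dedup (violations.map pvKey)) (fun k => k)
      = pvKeys (PySem.List.sorted violations pvKey) := by
  apply PySem.List.sorted_eq_of_perm_of_pairwise_lt
  · refine (List.perm_ext_iff_of_nodup ?_ ?_).mpr ?_
    · exact ((pv_pvKeys_pairwise _ (PySem.List.sorted_pairwise violations pvKey)).imp
        (fun {a b} hab => ne_of_lt hab))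
    · exact PySem.List.nodup_dedup _
    · intro x
      rw [PySem.List.mem_dedup]
      constructor
      · intro hx
        rcases pv_mem_pvKeys _ _ hx with ⟨w, hw, hwk⟩
        exact List.mem_map.mpr ⟨w, (PySem.List.mem_sorted _ _ _ _).mp hw, hwk⟩
      · intro hx
        rcases List.mem_map.mp hx with ⟨w, hw, hwk⟩
        exact hwk ▸ pv_mem_pvKeys_of_mem _ (PySem.List.sorted_pairwise violations pvKey) w
          ((PySem.List.mem_sorted _ _ _ _).mpr hw)
  · exact pv_pvKeys_pairwise _ (PySem.List.sorted_pairwise violations pvKey)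


-- ===== VERDICT (by name: the statement is the Claim_ definition above) =====
lemma pv_A_items (violations : List (List (String × String))) (k : String) :
    (violations.foldl (fun d v => d.modify (pvGet v "check" "?") [] (· ++ [v]))
        PySem.Dict.empty).getD k []
      = violations.filter (fun v => pvGet v "check" "?" == k) := by
  have h := PySem.Dict.getD_foldl_modify_append
    (l := violations.map (fun v => (pvGet v "check" "?", v))) (d := PySem.Dict.empty) (c := k)
  rw [List.foldl_map] at h
  simpa [List.filter_map, Function.comp_def, List.map_map] using h

theorem format_audit_violations_spec : Claim_equal_format_audit_violations := by
  intro violations _hdom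
  unfold Spec_format_audit_violations format_audit_violations format_audit_violations_alt
  by_cases hnil : violations = []
  · simp [hnil]
  · rw [if_neg hnil, if_neg hnil]
    have hkeys : (violations.foldl
          (fun d v => d.modify (pvGet v "check" "?") [] (· ++ [v])) PySem.Dict.empty).keys
        = PySem.List.dedup (violations.map pvKey) := by
      rw [PySem.Dict.keys_foldl_modify_key violations (fun v => pvGet v "check" "?") []
        (fun d v => (· ++ [v])) PySem.Dict.empty]
      rfl
    simp only [hkeys, pv_A_items, PySem.List.foldl_append_singleton_eq_map, List.append_assoc]
    rw [PySem.List.foldl_append_eq_flatMap]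
    simp only [pvKey_def]
    rw [pv_pvEmit_eq _ (PySem.List.sorted_pairwise violations pvKey), pv_sorted_keys]
    simp only [List.append_assoc]
    congr 1
    congr 1
    congr 1
    refine List.flatMap_congr (fun k _hk => ?_)
    unfold pvBlock
    rw [pv_filter_sorted]
    simp
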